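-- pv_equiv track=rewrite | github.com/uwcms/FinalStateAnalysis | Utilities/python/lumitools.py | json_summary
-- ===== SOURCE A (Python) =====
-- def group_by_run(sorted_run_lumis):
--     '''
--     Generate a list of lists run-lumi tuples, grouped by run
--     Example:
--     >>> run_lumis = [(100, 1), (100, 2), (150, 1), (150, 2), (150, 8)]
--     >>> list(group_by_run(run_lumis))
--     [(100, [1, 2]), (150, [1, 2, 8])]
--
--     '''
--     current_run = None
--     output = []
--     for run, lumi in sorted_run_lumis:
--         if current_run is None or run == current_run:
--             output.append(lumi)
--         else:
--             yield (current_run, output)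
--             output = [lumi]
--         current_run = run
--     yield (current_run, output)
--
-- def collapse_ranges_in_list(xs):
--     '''
--     Generate a list of contiguous ranges in a list of numbers.
--     Example:
--     >>> list(collapse_ranges_in_list([1, 2, 3, 5, 8, 9, 10]))
--     [[1, 3], [5, 5], [8, 10]]
--     '''
--     output = []
--     for x in xs:
--         if not output:
--             # Starting new range
--             output = [x, x]
--         elif x == output[1]+1:
--             output[1] = x
--         else:
--             yield output
--             output = [x, x]
--     yield output
--
-- def json_summary(run_lumi_set):
--     '''
--     Compute a crab -report like json summary for a set of runs and lumis.
--     Example: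
--     >>> run_lumis = [(100, 2), (100, 1), (150, 1), (150, 2), (150, 8)]
--     >>> # Disable indentation
--     >>> json_summary(run_lumis)
--     {'150': [[1, 2], [8, 8]], '100': [[1, 2]]}
--     '''
--     run_lumis = sorted(run_lumi_set)
--     output = {}
--     if not run_lumis:
--         return output
--     for run, lumis_in_run in group_by_run(run_lumis):
--         output[str(run)] = list(collapse_ranges_in_list(lumis_in_run))
--     return output
-- ===== SOURCE B (Python) =====
-- def _chunks(xs, key):
--     """Split xs into maximal consecutive blocks whose elements share one key value."""
--     res = []
--     i = 0
--     n = len(xs)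
--     while i < n:
--         j = i + 1
--         k = key(xs[i])
--         while j < n and key(xs[j]) == k:
--             j += 1
--         res.append(xs[i:j])
--         i = j
--     return res
--
--
-- def _ranges(lumis):
--     # value-minus-index idiom: a block of consecutive integers has constant x - i
--     return [[g[0][1], g[-1][1]]
--             for g in _chunks(list(enumerate(lumis)), lambda p: p[1] - p[0])]
--
--
-- def json_summary(run_lumi_set):
--     return {str(b[0][0]): _ranges([rl[1] for rl in b])
--             for b in _chunks(sorted(run_lumi_set), lambda rl: rl[0])}
-- ===== Notes on version B (the rewrite author's own statement) =====
-- stated objective: alternative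
-- what changed: Replaces A's two stateful generator scans (prev-run comparison and prev+1 range mutation) with one generic two-pointer chunking helper applied twice: runs keyed by the pair's first component, contiguous lumi ranges keyed by the value-minus-index invariant, taking each range as the first and last element of its chunk.
import Mathlib
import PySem

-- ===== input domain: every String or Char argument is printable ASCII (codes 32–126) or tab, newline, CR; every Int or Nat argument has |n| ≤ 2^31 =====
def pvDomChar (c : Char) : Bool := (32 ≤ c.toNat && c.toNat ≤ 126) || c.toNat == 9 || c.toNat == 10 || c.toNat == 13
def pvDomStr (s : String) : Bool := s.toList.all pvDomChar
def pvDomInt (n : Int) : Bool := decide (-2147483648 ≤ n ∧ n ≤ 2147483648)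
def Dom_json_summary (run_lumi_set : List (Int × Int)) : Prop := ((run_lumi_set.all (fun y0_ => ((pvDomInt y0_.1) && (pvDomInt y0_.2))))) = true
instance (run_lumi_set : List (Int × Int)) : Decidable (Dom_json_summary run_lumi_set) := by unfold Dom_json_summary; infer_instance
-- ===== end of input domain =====

-- B replaces A's two stateful generator scans by a generic key-based chunking helper used twice
-- (runs keyed by fst, contiguous lumis keyed by the value-minus-index invariant); same cost, alternative algorithm.


-- ===== PORT A =====
-- group_by_run's loop body (current_run, output, yielded-so-far)
def groupStep (st : Option Int × List Int × List (Option Int × List Int)) (p : Int × Int) :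
    Option Int × List Int × List (Option Int × List Int) :=
  match st with
  | (cr, out, acc) =>
    if cr = none ∨ some p.1 = cr then (some p.1, out ++ [p.2], acc)
    else (some p.1, [p.2], acc ++ [(cr, out)])

-- list(group_by_run(xs)): the generator is always fully consumed, so it is its list of yields
def group_by_run (xs : List (Int × Int)) : List (Option Int × List Int) :=
  let st := xs.foldl groupStep (none, [], [])
  st.2.2 ++ [(st.1, st.2.1)]

-- collapse_ranges_in_list's loop body; `out` is [] or the 2-element [start, end], so
-- output[0]/output[1] are ported as pyGetD with an unreachable default
def collapseStep (st : List Int × List (List Int)) (x : Int) : List Int × List (List Int) :=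
  match st with
  | (out, acc) =>
    if out = [] then ([x, x], acc)
    else if x = PySem.List.pyGetD out 1 0 + 1 then ([PySem.List.pyGetD out 0 0, x], acc)
    else ([x, x], acc ++ [out])

def collapse_ranges_in_list (xs : List Int) : List (List Int) :=
  let st := xs.foldl collapseStep ([], [])
  st.2 ++ [st.1]

def json_summary (run_lumi_set : List (Int × Int)) : List (String × List (List Int)) :=
  let run_lumis := PySem.List.sorted2 run_lumi_set (·.1) (·.2)
  if run_lumis = [] then []
  else
    ((group_by_run run_lumis).foldl
      (fun d g =>
        d.insert (match g.1 with | some r => PySem.Int.toStr r | none => "None")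
          (collapse_ranges_in_list g.2))
      PySem.Dict.empty).items

-- ===== PORT B =====
-- Source B's _chunks: the index two-pointer while loop, as structural recursion on the
-- remaining suffix (xs[i:j] = head :: takeWhile same-key; i := j is the dropWhile suffix)
def chunkBy {α β : Type} [DecidableEq β] (key : α → β) : List α → List (List α)
  | [] => []
  | x :: xs =>
    (x :: xs.takeWhile (fun y => decide (key y = key x))) ::
      chunkBy key (xs.dropWhile (fun y => decide (key y = key x)))
termination_by l => l.length
decreasing_by simp only [List.length_cons]; exact Nat.lt_succ_of_le (List.length_dropWhile_le _ _)

-- Source B's _ranges; chunks are nonempty, so g[0]/g[-1] are headD/getLastD with unreachable defaults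
def pyRanges (lumis : List Int) : List (List Int) :=
  (chunkBy (fun p : Int × Int => p.2 - p.1) (PySem.List.enumerate lumis)).map
    (fun g => [(g.headD (0, 0)).2, (g.getLastD (0, 0)).2])

def json_summary_alt (run_lumi_set : List (Int × Int)) : List (String × List (List Int)) :=
  (chunkBy (fun rl : Int × Int => rl.1) (PySem.List.sorted2 run_lumi_set (·.1) (·.2))).map
    (fun b => (PySem.Int.toStr (b.headD (0, 0)).1, pyRanges (b.map (·.2))))

-- ===== PRECONDITION & SPEC =====
def Spec_json_summary (run_lumi_set : List (Int × Int)) (out : List (String × List (List Int))) : Prop := out = json_summary_alt run_lumi_set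
instance (run_lumi_set : List (Int × Int)) (out : List (String × List (List Int))) : Decidable (Spec_json_summary run_lumi_set out) := by unfold Spec_json_summary; infer_instance

-- ===== CLAIM (what is proved, stated in full; the proofs are below) =====
def Claim_equal_json_summary : Prop := ∀ (run_lumi_set : List (Int × Int)), Dom_json_summary run_lumi_set → Spec_json_summary run_lumi_set (json_summary run_lumi_set)

-- ===== LEMMAS AND PROOFS =====

-- canonical recursive form of group_by_run's scan
def gb (cr : Int) (out : List Int) : List (Int × Int) → List (Option Int × List Int)
  | [] => [(some cr, out)]
  | p :: l => if p.1 = cr then gb cr (out ++ [p.2]) l else (some cr, out) :: gb p.1 [p.2] l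

-- canonical recursive form of collapse_ranges_in_list's scan
def cl (a b : Int) : List Int → List (List Int)
  | [] => [[a, b]]
  | x :: l => if x = b + 1 then cl a x l else [a, b] :: cl x x l

lemma foldl_groupStep (l : List (Int × Int)) : ∀ (cr : Int) (out : List Int) acc,
    (let st := l.foldl groupStep (some cr, out, acc); st.2.2 ++ [(st.1, st.2.1)]) =
      acc ++ gb cr out l := by
  induction l with
  | nil => intro cr out acc; simp [gb]
  | cons p l ih =>
    intro cr out acc
    by_cases h : p.1 = cr
    · simp [groupStep, gb, h, ih]
    · have h' : ¬ (some p.1 = some cr) := by simp [h]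
      simp [groupStep, gb, h, h', ih]

lemma gb_eq_chunkBy (l : List (Int × Int)) : ∀ (cr : Int) (out : List Int),
    gb cr out l =
      (some cr, out ++ (l.takeWhile (fun y => decide (y.1 = cr))).map (·.2)) ::
        (chunkBy (fun rl : Int × Int => rl.1) (l.dropWhile (fun y => decide (y.1 = cr)))).map
          (fun blk => (some (blk.headD (0, 0)).1, blk.map (·.2))) := by
  induction l with
  | nil => intro cr out; simp [gb, chunkBy]
  | cons p l ih =>
    intro cr out
    by_cases h : p.1 = cr
    · simp [gb, h, ih]
    · simp [gb, h, chunkBy, ih]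

lemma group_by_run_eq (x : Int × Int) (l : List (Int × Int)) :
    group_by_run (x :: l) =
      (chunkBy (fun rl : Int × Int => rl.1) (x :: l)).map
        (fun blk => (some (blk.headD (0, 0)).1, blk.map (·.2))) := by
  have h0 : (x :: l).foldl groupStep (none, [], []) = l.foldl groupStep (some x.1, [x.2], []) := by
    simp [groupStep]
  have h1 := foldl_groupStep l x.1 [x.2] []
  simp only [group_by_run, h0]
  simp only [h1, List.nil_append, gb_eq_chunkBy, chunkBy]
  simp

lemma foldl_collapseStep (l : List Int) : ∀ (a b : Int) acc,
    (let st := l.foldl collapseStep ([a, b], acc); st.2 ++ [st.1]) = acc ++ cl a b l := by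
  induction l with
  | nil => intro a b acc; simp [cl]
  | cons x l ih =>
    intro a b acc
    have hg1 : PySem.List.pyGetD [a, b] 1 0 = b := by rfl
    have hg0 : PySem.List.pyGetD [a, b] 0 0 = a := by rfl
    by_cases h : x = b + 1
    · simp [collapseStep, cl, h, hg1, ih]
    · simp [collapseStep, cl, h, hg1, ih]

lemma collapse_eq_cl (x : Int) (l : List Int) :
    collapse_ranges_in_list (x :: l) = cl x x l := by
  have h0 : (x :: l).foldl collapseStep ([], []) = l.foldl collapseStep ([x, x], []) := by
    simp [collapseStep]
  have h1 := foldl_collapseStep l x x []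
  simp only [collapse_ranges_in_list, h0] at *
  simpa using h1

lemma cl_eq_chunk (l : List Int) : ∀ (s k a b : Int), b - (s - 1) = k →
    cl a b l =
      [a, (((PySem.List.enumerate l s).takeWhile (fun q => decide (q.2 - q.1 = k))).getLastD (s - 1, b)).2] ::
        (chunkBy (fun p : Int × Int => p.2 - p.1)
            ((PySem.List.enumerate l s).dropWhile (fun q => decide (q.2 - q.1 = k)))).map
          (fun g => [(g.headD (0, 0)).2, (g.getLastD (0, 0)).2]) := by
  induction l with
  | nil => intro s k a b hk; simp [cl, chunkBy]
  | cons x l ih =>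
    intro s k a b hk
    rw [PySem.List.enumerate_cons]
    by_cases h : x - s = k
    · have hx : x = b + 1 := by omega
      have hrec := ih (s + 1) k a x (by omega)
      have hs : s + 1 - 1 = s := by omega
      rw [hs] at hrec
      simp only [cl, if_pos hx, List.takeWhile_cons, List.dropWhile_cons, h, decide_true,
        if_true, List.getLastD_cons]
      exact hrec
    · have hx : ¬ (x = b + 1) := by omega
      simp only [cl, if_neg hx, List.takeWhile_cons, List.dropWhile_cons, h, decide_false,
        Bool.false_eq_true, if_false, List.getLastD_nil]
      have hrec := ih (s + 1) (x - s) x x (by omega)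
      have hs : s + 1 - 1 = s := by omega
      rw [hs] at hrec
      simp only [chunkBy, List.map_cons]
      simp only [List.headD_cons, List.getLastD_cons]
      rw [hrec]

lemma pyRanges_eq (x : Int) (l : List Int) : pyRanges (x :: l) = cl x x l := by
  have h := cl_eq_chunk l 1 x x x (by omega)
  simp only [pyRanges, PySem.List.enumerate_cons, chunkBy, List.map_cons, List.headD_cons,
    List.getLastD_cons]
  rw [h]
  norm_num

-- ---- str(n) is injective ----
def digs (n : Nat) : List Char :=
  if h : n / 10 = 0 then [Nat.digitChar (n % 10)]
  else digs (n / 10) ++ [Nat.digitChar (n % 10)]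
termination_by n
decreasing_by omega

lemma digs_ne_nil (n : Nat) : digs n ≠ [] := by
  rw [digs]; split <;> simp

lemma digitChar_inj (a b : Nat) (ha : a < 10) (hb : b < 10)
    (h : Nat.digitChar a = Nat.digitChar b) : a = b := by
  interval_cases a <;> interval_cases b <;> revert h <;> decide

lemma digs_inj : ∀ m n : Nat, digs m = digs n → m = n := by
  intro m
  induction m using Nat.strong_induction_on with
  | _ m ih =>
    intro n h
    rw [digs] at h
    conv at h => rhs; rw [digs]
    split_ifs at h with h1 h2 h2
    · have := digitChar_inj (m % 10) (n % 10) (by omega) (by omega) (List.singleton_inj.mp h)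
      omega
    · rw [show [Nat.digitChar (m % 10)] = [] ++ [Nat.digitChar (m % 10)] from rfl] at h
      exact absurd (List.append_singleton_inj.mp h).1.symm (digs_ne_nil _)
    · rw [show [Nat.digitChar (n % 10)] = [] ++ [Nat.digitChar (n % 10)] from rfl] at h
      exact absurd (List.append_singleton_inj.mp h).1 (digs_ne_nil _)
    · obtain ⟨hd, hc⟩ := List.append_singleton_inj.mp h
      have h10 := ih (m / 10) (by omega) (n / 10) hd
      have := digitChar_inj (m % 10) (n % 10) (by omega) (by omega) hc
      omega

lemma toDigitsCore_eq_digs : ∀ (f n : Nat), n < f → ∀ ds : List Char,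
    Nat.toDigitsCore 10 f n ds = digs n ++ ds := by
  intro f
  induction f with
  | zero => omega
  | succ f ih =>
    intro n hn ds
    rw [Nat.toDigitsCore]
    by_cases h : n / 10 = 0
    · rw [if_pos h, digs, dif_pos h]
      rfl
    · rw [if_neg h, ih (n / 10) (by omega)]
      conv_rhs => rw [digs]
      rw [dif_neg h]
      simp

lemma digs_no_dash : ∀ n : Nat, '-' ∉ digs n := by
  intro n
  induction n using Nat.strong_induction_on with
  | _ n ih =>
    have hm : Nat.digitChar (n % 10) ≠ '-' := by
      have h10 : n % 10 < 10 := by omega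
      generalize hq : n % 10 = q at h10
      interval_cases q <;> decide
    rw [digs]
    split_ifs with h1
    · simp only [List.mem_singleton]
      exact fun hc => hm hc.symm
    · simp only [List.mem_append, List.mem_singleton]
      rintro (hmem | hmem)
      · exact ih (n / 10) (by omega) hmem
      · exact hm hmem.symm

lemma toDigits_eq_digs (n : Nat) : Nat.toDigits 10 n = digs n := by
  rw [Nat.toDigits, toDigitsCore_eq_digs (n + 1) n (by omega), List.append_nil]

lemma toChars_inj (a b : Int) (h : PySem.Int.toChars a = PySem.Int.toChars b) : a = b := by
  simp only [PySem.Int.toChars, toDigits_eq_digs] at h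
  split_ifs at h with h1 h2 h2
  · obtain ⟨-, htl⟩ := List.cons_eq_cons.mp h
    have := digs_inj _ _ htl
    omega
  · have hc : '-' ∈ digs b.toNat := by rw [← h]; exact List.mem_cons_self
    exact absurd hc (digs_no_dash _)
  · have hc : '-' ∈ digs a.toNat := by rw [h]; exact List.mem_cons_self
    exact absurd hc (digs_no_dash _)
  · have := digs_inj _ _ h
    omega

lemma toStr_inj : Function.Injective PySem.Int.toStr := by
  intro a b h
  apply toChars_inj
  rw [← PySem.Int.toList_toStr, ← PySem.Int.toList_toStr, h]

-- ---- chunk shape / membership ----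
lemma chunkBy_mem {α β : Type} [DecidableEq β] (key : α → β) :
    ∀ (n : Nat) (l : List α), l.length ≤ n → ∀ blk ∈ chunkBy key l,
      (∃ y t, blk = y :: t) ∧ ∀ z ∈ blk, z ∈ l := by
  intro n
  induction n with
  | zero =>
    intro l hl
    have : l = [] := by cases l <;> simp_all
    subst this
    simp [chunkBy]
  | succ n ih =>
    intro l hl blk hm
    cases l with
    | nil => simp [chunkBy] at hm
    | cons x xs =>
      simp only [chunkBy, List.mem_cons] at hm
      rcases hm with hm | hm
      · subst hm
        refine ⟨⟨_, _, rfl⟩, ?_⟩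
        intro z hz
        rcases List.mem_cons.mp hz with hz | hz
        · simp [hz]
        · exact List.mem_cons_of_mem _ ((List.takeWhile_sublist _).subset hz)
      · have hlen : (xs.dropWhile (fun y => decide (key y = key x))).length ≤ n :=
          le_trans (List.length_dropWhile_le _ _) (by simpa using hl)
        obtain ⟨hsh, hmem⟩ := ih _ hlen blk hm
        exact ⟨hsh, fun z hz => List.mem_cons_of_mem _ ((List.dropWhile_sublist _).subset (hmem z hz))⟩

-- heads of the run chunks of a fst-sorted list are strictly increasing
lemma chunk_heads_pairwise :
    ∀ (n : Nat) (l : List (Int × Int)), l.length ≤ n →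
      l.Pairwise (fun a b => a.1 ≤ b.1) →
      ((chunkBy (fun rl : Int × Int => rl.1) l).map (fun blk => (blk.headD (0, 0)).1)).Pairwise (· < ·) := by
  intro n
  induction n with
  | zero =>
    intro l hl _
    have : l = [] := by cases l <;> simp_all
    subst this
    simp [chunkBy]
  | succ n ih =>
    intro l hl hp
    cases l with
    | nil => simp [chunkBy]
    | cons x xs =>
      obtain ⟨hx, hxs⟩ := List.pairwise_cons.mp hp
      simp only [chunkBy, List.map_cons]
      rw [List.pairwise_cons]
      have hD : ∀ z ∈ xs.dropWhile (fun y => decide (y.1 = x.1)), x.1 < z.1 := by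
        cases hD0 : xs.dropWhile (fun y => decide (y.1 = x.1)) with
        | nil => simp
        | cons y0 D' =>
          have hne : (xs.dropWhile (fun y => decide (y.1 = x.1))) ≠ [] := by simp [hD0]
          have hy0 : ¬ (y0.1 = x.1) := by
            have hh := List.head_dropWhile_not (fun y : Int × Int => decide (y.1 = x.1)) hne
            rw [show (xs.dropWhile (fun y : Int × Int => decide (y.1 = x.1))).head hne = y0 from by
              simp [hD0]] at hh
            simpa using hh
          have hy0mem : y0 ∈ xs := (List.dropWhile_sublist _).subset (by rw [hD0]; exact List.mem_cons_self)
          have hxy0 : x.1 < y0.1 := lt_of_le_of_ne (hx y0 hy0mem) (Ne.symm hy0)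
          have hpD : (y0 :: D').Pairwise (fun a b : Int × Int => a.1 ≤ b.1) := by
            rw [← hD0]; exact hxs.sublist (List.dropWhile_sublist _)
          intro z hz
          rcases List.mem_cons.mp hz with hz | hz
          · subst hz; exact hxy0
          · exact lt_of_lt_of_le hxy0 ((List.pairwise_cons.mp hpD).1 z hz)
      constructor
      · intro a ha
        obtain ⟨blk, hblk, rfl⟩ := List.mem_map.mp ha
        obtain ⟨⟨y, t, rfl⟩, hmem⟩ := chunkBy_mem _ xs.length _ (List.length_dropWhile_le _ _) blk hblk
        exact hD _ (hmem y List.mem_cons_self)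
      · refine ih _ (le_trans (List.length_dropWhile_le _ _) (by simpa using hl)) ?_
        exact hxs.sublist (List.dropWhile_sublist _)

-- ---- the sort is fst-nondecreasing ----
lemma insertBy_pairwise_P {α : Type} (P : α → α → Prop)
    (htrans : ∀ a b c, P a b → P b c → P a c)
    (before : α → α → Bool)
    (h1 : ∀ a c, before a c = true → P a c) (h2 : ∀ a c, before a c = false → P c a)
    (x : α) : ∀ ys : List α, ys.Pairwise P → (PySem.List.insertBy before x ys).Pairwise P := by
  intro ys
  induction ys with
  | nil => intro _; simp [PySem.List.insertBy]
  | cons y ys ih =>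
    intro hp
    obtain ⟨hy, hys⟩ := List.pairwise_cons.mp hp
    show (if before x y = true then x :: y :: ys else y :: PySem.List.insertBy before x ys).Pairwise P
    split_ifs with hb
    · rw [List.pairwise_cons]
      refine ⟨?_, hp⟩
      intro a ha
      rcases List.mem_cons.mp ha with ha | ha
      · subst ha; exact h1 _ _ hb
      · exact htrans _ _ _ (h1 _ _ hb) (hy a ha)
    · rw [List.pairwise_cons]
      refine ⟨?_, ih hys⟩
      intro a ha
      rcases (PySem.List.insertBy_mem_iff before x a ys).mp ha with ha | ha
      · subst ha; exact h2 _ _ (by simpa using hb)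
      · exact hy a ha

lemma sorted2_pairwise_fst (xs : List (Int × Int)) :
    (PySem.List.sorted2 xs (·.1) (·.2)).Pairwise (fun a b => a.1 ≤ b.1) := by
  have key : ∀ (ys : List (Int × Int)) (acc : List (Int × Int)),
      acc.Pairwise (fun a b : Int × Int => a.1 ≤ b.1) →
      (ys.foldl (fun acc x => PySem.List.insertBy
        (fun a b => decide (a.1 < b.1) || (!decide (b.1 < a.1) && decide (a.2 < b.2))) x acc) acc).Pairwise
        (fun a b : Int × Int => a.1 ≤ b.1) := by
    intro ys
    induction ys with
    | nil => intro acc h; exact h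
    | cons y ys ih =>
      intro acc h
      refine ih _ (insertBy_pairwise_P _ ?_ _ ?_ ?_ y acc h)
      · intro a b c hab hbc; omega
      · intro a c hb
        simp only [Bool.or_eq_true, Bool.and_eq_true, Bool.not_eq_true', decide_eq_true_eq,
          decide_eq_false_iff_not] at hb
        rcases hb with hb | ⟨hb, _⟩ <;> omega
      · intro a c hb
        simp only [Bool.or_eq_false_iff, Bool.and_eq_false_iff, Bool.not_eq_false',
          decide_eq_false_iff_not, decide_eq_true_eq] at hb
        omega
  simpa [PySem.List.sorted2] using key xs [] List.Pairwise.nil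

-- ===== VERDICT (by name: the statement is the Claim_ definition above) =====
theorem json_summary_spec : Claim_equal_json_summary := by
  intro rls _
  simp only [Spec_json_summary, json_summary, json_summary_alt]
  generalize hsg : PySem.List.sorted2 rls (fun rl => rl.1) (fun rl => rl.2) = s
  have hpair : s.Pairwise (fun a b : Int × Int => a.1 ≤ b.1) := by
    rw [← hsg]; exact sorted2_pairwise_fst rls
  cases s with
  | nil => simp [chunkBy]
  | cons x l =>
    rw [if_neg (List.cons_ne_nil x l)]
    rw [group_by_run_eq, List.foldl_map]
    rw [PySem.Dict.items_foldl_insert_fresh _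
      (fun blk : List (Int × Int) => PySem.Int.toStr (blk.headD (0, 0)).1)
      (fun blk : List (Int × Int) => collapse_ranges_in_list (blk.map (·.2)))
      PySem.Dict.empty
      (fun a _ => PySem.Dict.contains_empty _)
      ?nodup]
    case nodup =>
      show (List.map (PySem.Int.toStr ∘ (fun blk : List (Int × Int) => (blk.headD (0, 0)).1))
        (chunkBy (fun rl : Int × Int => rl.1) (x :: l))).Nodup
      rw [← List.map_map]
      refine List.Nodup.map toStr_inj ?_
      have := chunk_heads_pairwise (x :: l).length (x :: l) le_rfl hpair
      exact this.imp ne_of_lt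
    · rw [show (PySem.Dict.empty : PySem.Dict String (List (List Int))).items = [] from rfl,
        List.nil_append]
      refine List.map_congr_left ?_
      intro blk hblk
      obtain ⟨⟨y, t, rfl⟩, _⟩ := chunkBy_mem _ (x :: l).length _ le_rfl blk hblk
      simp only [List.map_cons]
      rw [collapse_eq_cl, pyRanges_eq]
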